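-- pv_equiv track=rewrite | github.com/starswap/CompetitiveProgramming | ICPC/BAPC/2021/G.py | block_to_ops
-- ===== SOURCE A (Python) =====
-- BLOCK_SIZE = 16
--
-- def block_to_ops(block):
--     ops = ""
--     for j in range(BLOCK_SIZE):
--         operation = ((1 << j) & block) >> j
--         if operation == 0:
--             ops += "x"
--         else:
--             ops += "+"
--     return ops
-- ===== SOURCE B (Python) =====
-- BLOCK_SIZE = 16
--
-- _TABLE = str.maketrans("01", "x+")
--
-- def block_to_ops(block):
--     bits = block & 0xFFFF
--     return format(bits, "b").zfill(BLOCK_SIZE)[::-1].translate(_TABLE)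
-- ===== Notes on version B (the rewrite author's own statement) =====
-- stated objective: idiomatic
-- what changed: A's per-index loop that masks and shifts out each bit of the block and appends a character is replaced by masking the block once to its low BLOCK_SIZE bits, formatting that value as one zero-padded binary string, reversing it and translating zero/one digits to 'x'/'+' via str.translate.
import Mathlib
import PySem

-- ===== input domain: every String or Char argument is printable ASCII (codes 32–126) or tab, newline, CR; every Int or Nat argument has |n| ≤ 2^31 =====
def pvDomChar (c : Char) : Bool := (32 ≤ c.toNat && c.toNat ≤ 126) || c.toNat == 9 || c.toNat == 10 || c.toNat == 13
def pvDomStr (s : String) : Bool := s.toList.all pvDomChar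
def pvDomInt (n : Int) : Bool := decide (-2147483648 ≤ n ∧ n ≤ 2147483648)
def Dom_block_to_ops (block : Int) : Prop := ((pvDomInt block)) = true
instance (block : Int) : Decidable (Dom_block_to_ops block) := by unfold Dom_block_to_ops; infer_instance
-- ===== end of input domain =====

-- B replaces A's per-index mask-and-shift loop by masking once, formatting the 16-bit value
-- as a zero-padded binary string, reversing it and translating '0'/'1' to 'x'/'+' (objective: idiomatic).

-- ===== PORT A =====
def BLOCK_SIZE : Int := 16

-- literal port of A's loop: for j in range(BLOCK_SIZE): operation = ((1 << j) & block) >> j; append 'x' or '+'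
def block_to_ops (block : Int) : String :=
  (PySem.List.pyRange 0 BLOCK_SIZE).foldl
    (fun ops j =>
      let operation := (PySem.Int.band ((1 : Int) <<< j.toNat) block) >>> j.toNat
      if operation = 0 then ops ++ "x" else ops ++ "+") ""

-- ===== PORT B =====
-- the translate table str.maketrans("01", "x+"): '0' ↦ 'x', '1' ↦ '+', any other character unchanged
def pvTransChar (c : Char) : Char := if c = '0' then 'x' else if c = '1' then '+' else c

-- literal port of B: bits = block & 0xFFFF; return format(bits, "b").zfill(BLOCK_SIZE)[::-1].translate(table)
def block_to_ops_alt (block : Int) : String :=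
  let bits := PySem.Int.band block 65535
  let s := ((PySem.Str.slice? (PySem.Str.zfill (PySem.Int.toBin bits) BLOCK_SIZE) none none (-1)).getD "")
  String.ofList (s.toList.map pvTransChar)   -- s.translate(table): per-character mapping (exact: the table maps single chars)

-- ===== PRECONDITION & SPEC =====
def Spec_block_to_ops (block : Int) (out : String) : Prop := out = block_to_ops_alt block
instance (block : Int) (out : String) : Decidable (Spec_block_to_ops block out) := by unfold Spec_block_to_ops; infer_instance

-- ===== CLAIM (what is proved, stated in full; the proofs are below) =====
def Claim_equal_block_to_ops : Prop := ∀ (block : Int), Dom_block_to_ops block → Spec_block_to_ops block (block_to_ops block)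

-- ===== LEMMAS AND PROOFS =====

-- the low 16 bits of an integer, as Python's  block & 0xFFFF  computes them
def pvLow (b : Int) : Nat :=
  match b with
  | .ofNat n => n % 65536
  | .negSucc k => 65535 - k % 65536

theorem pvLow_lt (b : Int) : pvLow b < 65536 := by
  cases b <;> simp [pvLow] <;> omega

theorem pvBand_low (b : Int) : PySem.Int.band b 65535 = Int.ofNat (pvLow b) := by
  cases b with
  | ofNat n =>
    rw [show Int.ofNat n = ((n : Nat) : Int) from rfl, show (65535 : Int) = ((65535 : Nat) : Int) from rfl,
      PySem.Int.band_natCast]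
    have h : n &&& 65535 = n % 65536 := by
      have := Nat.and_two_pow_sub_one_eq_mod n 16
      norm_num at this; omega
    simp [h, pvLow]
  | negSucc k =>
    simp only [PySem.Int.band]
    rw [if_neg (by omega), if_pos (by omega)]
    have e1 : (-Int.negSucc k - 1) = (k : Int) := by simp [Int.negSucc_eq]
    have e2 : Int.toNat 65535 = 65535 := rfl
    rw [e1, e2]
    have h : (65535 &&& (k : Int).toNat) = k % 65536 := by
      rw [Int.toNat_natCast, Nat.and_comm]
      have := Nat.and_two_pow_sub_one_eq_mod k 16
      norm_num at this; omega
    rw [h]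
    rfl

-- MSB-first binary digits, the shape Nat.toDigits 2 produces
def pvNatBin (n : Nat) : List Char :=
  if h : n / 2 = 0 then [(n % 2).digitChar]
  else pvNatBin (n / 2) ++ [(n % 2).digitChar]
decreasing_by exact Nat.div_lt_self (by omega) (by omega)

-- LSB-first binary digits, exactly k of them
def pvLsb : Nat → Nat → List Char
  | 0, _ => []
  | k + 1, n => (n % 2).digitChar :: pvLsb k (n / 2)

theorem pvToDigitsCore_eq (f : Nat) : ∀ (n : Nat) (ds : List Char), n < f →
    Nat.toDigitsCore 2 f n ds = pvNatBin n ++ ds := by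
  induction f with
  | zero => intro n ds h; omega
  | succ f ih =>
    intro n ds h
    rw [Nat.toDigitsCore, pvNatBin]
    split
    · simp_all
    · rw [ih (n / 2) _ (by omega)]
      simp

theorem pvToDigits_eq (n : Nat) : Nat.toDigits 2 n = pvNatBin n := by
  rw [Nat.toDigits, pvToDigitsCore_eq (n+1) n [] (by omega), List.append_nil]

theorem pvNatBin_ne_nil (n : Nat) : pvNatBin n ≠ [] := by
  rw [pvNatBin]; split <;> simp

theorem pvNatBin_mem (n : Nat) : ∀ c ∈ pvNatBin n, c = '0' ∨ c = '1' := by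
  induction n using Nat.strong_induction_on with
  | _ n ih =>
    rw [pvNatBin]
    split
    · rcases Nat.mod_two_eq_zero_or_one n with h | h <;> simp [h] <;> decide
    · intro c hc
      rcases List.mem_append.mp hc with hc | hc
      · exact ih (n / 2) (Nat.div_lt_self (by omega) (by omega)) c hc
      · rcases Nat.mod_two_eq_zero_or_one n with h | h <;> simp [h] at hc <;> simp [hc] <;> decide

theorem pvNatBin_length (k : Nat) : ∀ n, n < 2 ^ k → 0 < k → (pvNatBin n).length ≤ k := by
  induction k with
  | zero => omega
  | succ k ih =>
    intro n hn _
    rw [pvNatBin]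
    split
    · simp
    · have hk : 0 < k := by
        rcases Nat.eq_zero_or_pos k with rfl | h
        · simp at hn; omega
        · exact h
      have hdiv : n / 2 < 2 ^ k := by
        have : 2 ^ (k+1) = 2 * 2 ^ k := by ring
        omega
      have := ih (n / 2) hdiv hk
      simp [List.length_append]
      omega

theorem pvLsb_zero (k : Nat) : pvLsb k 0 = List.replicate k '0' := by
  induction k with
  | zero => rfl
  | succ k ih => simp [pvLsb, ih, List.replicate_succ]; rfl

theorem pvPadRev (k : Nat) : ∀ n, n < 2 ^ k → 0 < k →
    (pvNatBin n).reverse ++ List.replicate (k - (pvNatBin n).length) '0' = pvLsb k n := by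
  induction k with
  | zero => omega
  | succ k ih =>
    intro n hn _
    rw [pvNatBin]
    split
    · rename_i h2
      simp [pvLsb]
      rw [show n / 2 = 0 from h2, pvLsb_zero]
    · have hk : 0 < k := by
        rcases Nat.eq_zero_or_pos k with rfl | h
        · simp at hn; omega
        · exact h
      have hn2 : n / 2 < 2 ^ k := by
        have : 2 ^ (k+1) = 2 * 2 ^ k := by ring
        omega
      have hrec := ih (n / 2) hn2 hk
      simp only [List.reverse_append, List.reverse_singleton, List.singleton_append,
        List.length_append, List.length_singleton, pvLsb]
      rw [show k + 1 - ((pvNatBin (n/2)).length + 1) = k - (pvNatBin (n/2)).length by omega]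
      simp [hrec]

theorem pvMapTrans_lsb (k : Nat) : ∀ n, (pvLsb k n).map pvTransChar =
    (List.range k).map (fun j => if n.testBit j then '+' else 'x') := by
  induction k with
  | zero => intro n; rfl
  | succ k ih =>
    intro n
    rw [List.range_succ_eq_map]
    simp only [pvLsb, List.map_cons, List.map_map, ih (n / 2)]
    congr 1
    · rcases Nat.mod_two_eq_zero_or_one n with h | h <;>
        simp [h, pvTransChar, Nat.testBit_zero] <;> decide
    · apply List.map_congr_left
      intro j _
      simp [Function.comp, Nat.testBit_div_two]

theorem pvCompl16 (x j : Nat) (hx : x < 65536) (hj : j < 16) :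
    (65535 - x).testBit j = ! x.testBit j := by
  set P := 2 ^ j with hP
  set q := x / P with hq
  set r := x % P with hr
  have hPpos : 0 < P := Nat.two_pow_pos j
  have hxd : x = P * q + r := (Nat.div_add_mod x P).symm
  have hrP : r < P := Nat.mod_lt _ hPpos
  set Q := 2 ^ (16 - j) - 1 with hQ
  have hpow : P * (Q + 1) = 65536 := by
    rw [hQ, Nat.sub_add_cancel (Nat.one_le_two_pow), hP, ← pow_add,
        show j + (16 - j) = 16 by omega]
    norm_num
  have hQodd : Q % 2 = 1 := by
    have h2 : 2 ^ (16 - j) = 2 * 2 ^ (15 - j) := by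
      rw [← pow_succ', show 15 - j + 1 = 16 - j by omega]
    have := Nat.two_pow_pos (15 - j)
    omega
  have h65 : 65535 = P * Q + (P - 1) := by
    have : P * (Q + 1) = P * Q + P := by ring
    omega
  have hqQ : q ≤ Q := by
    by_contra h
    push Not at h
    have h1 : P * (Q + 1) ≤ P * q := Nat.mul_le_mul_left _ (by omega)
    have h2 : P * q ≤ x := by omega
    omega
  have hmul : P * (Q - q) = P * Q - P * q := Nat.mul_sub _ _ _
  have hPq : P * q ≤ P * Q := Nat.mul_le_mul_left _ hqQ
  have hsub : 65535 - x = (P - 1 - r) + P * (Q - q) := by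
    rw [hmul]; omega
  have hdiv : (65535 - x) / P = Q - q := by
    rw [hsub, Nat.add_mul_div_left _ _ hPpos, Nat.div_eq_of_lt (by omega)]
    omega
  have hxdiv : x / P = q := rfl
  rw [Nat.testBit_eq_decide_div_mod_eq, Nat.testBit_eq_decide_div_mod_eq,
      ← hP, hdiv, hxdiv]
  rcases Nat.mod_two_eq_zero_or_one q with h | h <;>
    · have : (Q - q) % 2 = 1 - q % 2 := by omega
      simp [this, h]

-- A's per-bit test, expressed through the low 16 bits
theorem pvBitA (b : Int) (j : Nat) (hj : j < 16) :
    ((PySem.Int.band ((1 : Int) <<< j) b) >>> j = 0) ↔ ((pvLow b).testBit j = false) := by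
  have hshift : ((1 : Int) <<< j) = Int.ofNat (2 ^ j) := by
    simp [Int.shiftLeft_eq]
  rw [hshift]
  cases b with
  | ofNat n =>
    have h1 : PySem.Int.band (Int.ofNat (2^j)) (Int.ofNat n) = (((2^j) &&& n : Nat) : Int) :=
      PySem.Int.band_natCast _ _
    rw [h1]
    have h2 : (2^j) &&& n = (n.testBit j).toNat * 2^j := by
      rw [Nat.and_comm, Nat.and_two_pow]
    have h3 : ((((n.testBit j).toNat * 2^j : Nat) : Int)) >>> j = (((n.testBit j).toNat * 2^j) >>> j : Nat) := rfl
    have h4 : ((n.testBit j).toNat * 2^j) >>> j = (n.testBit j).toNat := by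
      rw [Nat.shiftRight_eq_div_pow]
      exact Nat.mul_div_cancel _ (Nat.two_pow_pos j)
    have h5 : (pvLow (Int.ofNat n)).testBit j = n.testBit j := by
      show ((n % 65536).testBit j) = n.testBit j
      rw [show (65536 : Nat) = 2 ^ 16 by norm_num, Nat.testBit_mod_two_pow]
      simp [hj]
    rw [h2, h3, h4, h5]
    cases n.testBit j <;> simp
  | negSucc k =>
    have h1 : PySem.Int.band (Int.ofNat (2^j)) (Int.negSucc k) = Int.ofNat (2^j - (2^j &&& k)) := by
      simp only [PySem.Int.band]
      rw [if_pos (show (0:Int) ≤ Int.ofNat (2^j) from Int.natCast_nonneg _),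
          if_neg (show ¬ (0:Int) ≤ Int.negSucc k by omega)]
      have e1 : (-Int.negSucc k - 1) = (k : Int) := by simp [Int.negSucc_eq]
      have e2 : (Int.ofNat (2^j)).toNat = 2^j := Int.toNat_natCast _
      rw [e1, e2]
      simp
    rw [h1]
    have h2 : (2^j) &&& k = (k.testBit j).toNat * 2^j := by
      rw [Nat.and_comm, Nat.and_two_pow]
    have h3 : (Int.ofNat (2^j - (k.testBit j).toNat * 2^j)) >>> j = ((2^j - (k.testBit j).toNat * 2^j) >>> j : Nat) := rfl
    have h4 : (2^j - (k.testBit j).toNat * 2^j) >>> j = 1 - (k.testBit j).toNat := by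
      rw [Nat.shiftRight_eq_div_pow]
      cases k.testBit j
      · simp [Nat.div_self (Nat.two_pow_pos j)]
      · simp
    have h5 : (pvLow (Int.negSucc k)).testBit j = ! k.testBit j := by
      show ((65535 - k % 65536).testBit j) = ! k.testBit j
      rw [pvCompl16 _ _ (by omega) hj,
          show (65536 : Nat) = 2 ^ 16 by norm_num, Nat.testBit_mod_two_pow]
      simp [hj]
    rw [h2, h3, h4, h5]
    cases k.testBit j <;> simp

-- A's loop, characterised bit by bit
theorem pvFoldA (b : Int) (k : Nat) (hk : k ≤ 16) : ∀ (s : String),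
    ((PySem.List.pyRange 0 (k : Int)).foldl
      (fun ops j =>
        let operation := (PySem.Int.band ((1 : Int) <<< j.toNat) b) >>> j.toNat
        if operation = 0 then ops ++ "x" else ops ++ "+") s).toList =
      s.toList ++ (List.range k).map (fun j => if (pvLow b).testBit j then '+' else 'x') := by
  induction k with
  | zero =>
    intro s
    simp [PySem.List.pyRange]
  | succ k ih =>
    intro s
    have hsplit : PySem.List.pyRange 0 ((k+1 : Nat) : Int) =
        PySem.List.pyRange 0 (k : Int) ++ [(k : Int)] := by
      rw [PySem.List.pyRange_one_append 0 (k : Int) ((k+1 : Nat) : Int) (by positivity) (by push_cast; omega)]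
      congr 1
      rw [PySem.List.pyRange_one_cons (by push_cast; omega)]
      rw [show ((k : Int) + 1) = ((k+1 : Nat) : Int) by push_cast; ring]
      simp [PySem.List.pyRange]
    rw [hsplit, List.foldl_append]
    have ih' := ih (by omega) s
    simp only [List.foldl_cons, List.foldl_nil, Int.toNat_natCast,
      Int.shiftLeft_natCast_right, Int.shiftRight_natCast_right] at ih' ⊢
    by_cases h : (pvLow b).testBit k
    · rw [if_neg (by rw [pvBitA b k (by omega)]; simp [h])]
      rw [String.toList_append, ih', List.range_succ]
      simp [h]
    · rw [if_pos (by rw [pvBitA b k (by omega)]; simp [h])]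
      rw [String.toList_append, ih', List.range_succ]
      simp [h]

theorem pvZfill (m : Nat) (hlen : (pvNatBin m).length ≤ 16) :
    PySem.Chars.zfill (pvNatBin m) 16 =
      List.replicate (16 - (pvNatBin m).length) '0' ++ pvNatBin m := by
  rw [PySem.Chars.zfill.eq_def]
  by_cases hc : (16 : Int) ≤ ((pvNatBin m).length : Int)
  · rw [if_pos hc]
    have h16 : (pvNatBin m).length = 16 := by omega
    rw [h16]
    simp
  · rw [if_neg hc]
    obtain ⟨c, rest, hcr⟩ : ∃ c rest, pvNatBin m = c :: rest := by
      rcases h : pvNatBin m with _ | ⟨c, rest⟩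
      · exact absurd h (pvNatBin_ne_nil m)
      · exact ⟨c, rest, rfl⟩
    rw [hcr]
    dsimp only
    have hc0 : ¬ (c = '+' ∨ c = '-') := by
      have hmem := pvNatBin_mem m c (by rw [hcr]; simp)
      rcases hmem with h | h <;> rw [h] <;> decide
    rw [if_neg hc0, ← hcr]
    norm_num [show Int.toNat 16 = 16 from rfl]

-- B, characterised bit by bit
theorem pvAltChars (b : Int) : (block_to_ops_alt b).toList =
    (List.range 16).map (fun j => if (pvLow b).testBit j then '+' else 'x') := by
  have hmlt : pvLow b < 65536 := pvLow_lt b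
  have hlen : (pvNatBin (pvLow b)).length ≤ 16 :=
    pvNatBin_length 16 (pvLow b) (by omega) (by omega)
  have htb : (PySem.Int.toBin (Int.ofNat (pvLow b))).toList = pvNatBin (pvLow b) := by
    rw [PySem.Int.toList_toBin, PySem.Int.toBinChars]
    rw [if_neg (by simp)]
    rw [show (Int.ofNat (pvLow b)).toNat = pvLow b from rfl, pvToDigits_eq]
  have hz : (PySem.Str.zfill (PySem.Int.toBin (Int.ofNat (pvLow b))) BLOCK_SIZE).toList =
      List.replicate (16 - (pvNatBin (pvLow b)).length) '0' ++ pvNatBin (pvLow b) := by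
    rw [show BLOCK_SIZE = (16:Int) from rfl, PySem.Str.toList_zfill, htb]
    exact pvZfill (pvLow b) hlen
  show (String.ofList _).toList = _
  rw [String.toList_ofList, pvBand_low b,
    PySem.Str.slice?_none_none_neg_one, Option.getD_some, String.toList_ofList, hz,
    List.reverse_append, List.reverse_replicate,
    pvPadRev 16 (pvLow b) (by omega) (by omega), pvMapTrans_lsb 16 (pvLow b)]

-- ===== VERDICT (by name: the statement is the Claim_ definition above) =====
theorem block_to_ops_spec : Claim_equal_block_to_ops := by
  intro b _
  unfold Spec_block_to_ops
  have hA := pvFoldA b 16 (by omega) ""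
  have hB := pvAltChars b
  have h : (block_to_ops b).toList = (block_to_ops_alt b).toList := by
    rw [hB]; simpa [block_to_ops, BLOCK_SIZE] using hA
  have h2 := congrArg String.ofList h
  simpa using h2
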